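-- pv_equiv track=rewrite | github.com/HZX-sparkle/Data-Structure | 项目1/FrequentPattern/main.py | is_frequent
-- ===== SOURCE A (Python) =====
-- def is_frequent(db: dict, itemset: tuple, min_sup: int):
--     count = 0
--     for y in db.values():
--         if set(y) & set(itemset) == set(itemset):
--             count += 1
--     if count >= min_sup:
--         return True, count
--     else:
--         return False, count
-- ===== SOURCE B (Python) =====
-- def is_frequent(db: dict, itemset: tuple, min_sup: int):
--     # Vertical view: intersect, per distinct item, the set of transaction
--     # indices whose transaction contains that item.
--     vals = list(db.values())
--     common = {i for i, _ in enumerate(vals)}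
--     for item in dict.fromkeys(itemset):
--         common &= {i for i, y in enumerate(vals) if item in y}
--     count = len(common)
--     return count >= min_sup, count
-- ===== Notes on version B (the rewrite author's own statement) =====
-- stated objective: alternative
-- what changed: A scans each transaction and tests set(y) & set(itemset) == set(itemset); B instead takes a vertical view: it intersects, over the distinct items of itemset, the sets of transaction indices containing each item, and the size of the final intersection is the support count.
import Mathlib
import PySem

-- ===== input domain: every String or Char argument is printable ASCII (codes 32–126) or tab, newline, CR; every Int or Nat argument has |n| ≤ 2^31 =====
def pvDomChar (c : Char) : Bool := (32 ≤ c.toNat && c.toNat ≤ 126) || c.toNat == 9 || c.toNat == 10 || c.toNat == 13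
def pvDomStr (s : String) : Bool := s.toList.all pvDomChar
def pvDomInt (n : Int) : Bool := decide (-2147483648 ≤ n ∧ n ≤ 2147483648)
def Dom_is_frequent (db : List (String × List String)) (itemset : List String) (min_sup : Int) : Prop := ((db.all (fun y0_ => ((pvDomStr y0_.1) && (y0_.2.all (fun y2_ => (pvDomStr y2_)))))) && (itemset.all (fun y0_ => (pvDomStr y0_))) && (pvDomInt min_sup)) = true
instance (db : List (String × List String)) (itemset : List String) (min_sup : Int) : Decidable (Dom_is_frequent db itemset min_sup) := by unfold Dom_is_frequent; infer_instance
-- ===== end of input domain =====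

-- B replaces A's per-transaction subset test by a vertical index: it intersects, per distinct item,
-- the set of transaction indices containing that item (objective: alternative algorithm, same cost class).


-- ===== PORT A =====
def is_frequent (db : List (String × List String)) (itemset : List String) (min_sup : Int) : Bool × Int :=
  let count : Int := ((PySem.Dict.ofList db).values).foldl
    (fun count y =>
      if PySem.Set.equal (PySem.Set.inter (PySem.Set.ofList y) (PySem.Set.ofList itemset))
           (PySem.Set.ofList itemset)
      then count + 1 else count) 0
  if count ≥ min_sup then (true, count) else (false, count)

-- ===== PORT B =====
def is_frequent_alt (db : List (String × List String)) (itemset : List String) (min_sup : Int) : Bool × Int :=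
  let vals := (PySem.Dict.ofList db).values
  let common0 : PySem.Set Int := PySem.Set.ofList ((PySem.List.enumerate vals).map (·.1))
  let common : PySem.Set Int := (PySem.List.dedup itemset).foldl
    (fun c item =>
      PySem.Set.inter c (PySem.Set.ofList ((PySem.List.enumerate vals).filterMap
        (fun iy => if iy.2.contains item then some iy.1 else none)))) common0
  let count : Int := PySem.Set.len common
  (decide (count ≥ min_sup), count)

-- ===== PRECONDITION & SPEC =====
def Spec_is_frequent (db : List (String × List String)) (itemset : List String) (min_sup : Int) (out : Bool × Int) : Prop := out = is_frequent_alt db itemset min_sup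
instance (db : List (String × List String)) (itemset : List String) (min_sup : Int) (out : Bool × Int) : Decidable (Spec_is_frequent db itemset min_sup out) := by unfold Spec_is_frequent; infer_instance

-- ===== CLAIM (what is proved, stated in full; the proofs are below) =====
def Claim_equal_is_frequent : Prop := ∀ (db : List (String × List String)) (itemset : List String) (min_sup : Int), Dom_is_frequent db itemset min_sup → Spec_is_frequent db itemset min_sup (is_frequent db itemset min_sup)

-- ===== LEMMAS AND PROOFS =====
theorem pv_cond_eq (itemset y : List String) :
    PySem.Set.equal (PySem.Set.inter (PySem.Set.ofList y) (PySem.Set.ofList itemset))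
      (PySem.Set.ofList itemset)
    = itemset.all (fun item => y.contains item) := by
  rw [Bool.eq_iff_iff]
  simp only [PySem.Set.equal_iff, PySem.Set.mem_inter, PySem.Set.mem_ofList,
    List.all_eq_true, List.contains_eq_mem, decide_eq_true_eq]
  constructor
  · intro h item hm; exact ((h item).mpr hm).1
  · intro h x
    constructor
    · rintro ⟨_, hx⟩; exact hx
    · intro hx; exact ⟨h x hx, hx⟩

theorem pv_foldl_inter_eq_filter {α β : Type} [BEq α] (L : List β) (S : β → PySem.Set α) :
    ∀ c : List α, L.foldl (fun c item => PySem.Set.inter c (S item)) c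
      = c.filter (fun i => L.all (fun item => (S item).contains i)) := by
  induction L with
  | nil => intro c; simp
  | cons a L ih =>
    intro c
    rw [List.foldl_cons, ih]
    show (PySem.Set.inter c (S a)).filter _ = _
    simp only [PySem.Set.inter, List.filter_filter, List.all_cons]
    apply List.filter_congr
    intro x _
    simp [Bool.and_comm]

theorem pv_pointwise (vals : List (List String)) (itemset : List String) (x : Int × List String)
    (hx : x ∈ PySem.List.enumerate vals 0) :
    (PySem.List.dedup itemset).all (fun item =>
        (PySem.Set.ofList ((PySem.List.enumerate vals).filterMap
          (fun iy => if iy.2.contains item then some iy.1 else none))).contains x.1)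
      = itemset.all (fun item => x.2.contains item) := by
  rw [PySem.List.mem_enumerate_iff] at hx
  obtain ⟨k, hk, rfl⟩ := hx
  rw [Bool.eq_iff_iff]
  simp only [List.all_eq_true, PySem.List.mem_dedup, PySem.Set.contains_eq_decide,
    PySem.Set.mem_ofList, List.mem_filterMap, PySem.List.mem_enumerate_iff,
    decide_eq_true_eq, List.contains_eq_mem]
  constructor
  · intro h item hm
    obtain ⟨a, ⟨j, hj, rfl⟩, hg⟩ := h item hm
    simp only [zero_add] at hg ⊢
    split at hg
    · rename_i hc
      have : (j : Int) = (k : Int) := by simpa using hg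
      have : j = k := by exact_mod_cast this
      subst this
      simpa using hc
    · simp at hg
  · intro h item hm
    refine ⟨((k : Int), vals[k]), ⟨k, hk, by simp⟩, ?_⟩
    simp only at h ⊢
    rw [if_pos]
    · simp
    · simpa using h item hm

theorem pv_count_eq (vals : List (List String)) (itemset : List String) :
    PySem.Set.len ((PySem.List.dedup itemset).foldl
      (fun c item =>
        PySem.Set.inter c (PySem.Set.ofList ((PySem.List.enumerate vals).filterMap
          (fun iy => if iy.2.contains item then some iy.1 else none))))
      (PySem.Set.ofList ((PySem.List.enumerate vals).map (·.1))))
    = (vals.countP (fun y => itemset.all (fun item => y.contains item)) : Int) := by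
  rw [pv_foldl_inter_eq_filter]
  have hnd : ((PySem.List.enumerate vals).map (·.1)).Nodup := by
    refine List.pairwise_map.mpr ?_
    exact (PySem.List.pairwise_lt_enumerate vals 0).imp (fun h => ne_of_lt h)
  rw [PySem.Set.ofList_eq_self_of_nodup _ hnd]
  rw [List.filter_map]
  have hpt : ∀ x ∈ PySem.List.enumerate vals 0,
      ((fun i => (PySem.List.dedup itemset).all (fun item =>
        (PySem.Set.ofList ((PySem.List.enumerate vals).filterMap
          (fun iy => if iy.2.contains item then some iy.1 else none))).contains i)) ∘ (·.1)) x
      = ((fun y => itemset.all (fun item => y.contains item)) ∘ (·.2)) x :=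
    fun x hx => pv_pointwise vals itemset x hx
  rw [List.filter_congr hpt]
  have hc : List.countP ((fun y => itemset.all (fun item => y.contains item)) ∘ (·.2))
      (PySem.List.enumerate vals 0)
      = List.countP (fun y => itemset.all (fun item => y.contains item)) vals := by
    rw [← List.countP_map, PySem.List.map_snd_enumerate]
  simp only [PySem.Set.len, List.length_map, ← List.countP_eq_length_filter, hc]

-- ===== VERDICT (by name: the statement is the Claim_ definition above) =====
theorem is_frequent_spec : Claim_equal_is_frequent := by
  intro db itemset min_sup _
  unfold Spec_is_frequent is_frequent is_frequent_alt
  simp only []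
  set vals := (PySem.Dict.ofList db).values with hvals
  have hA := PySem.List.foldl_congr_mem' vals
    (fun (count : Int) y =>
      if PySem.Set.equal (PySem.Set.inter (PySem.Set.ofList y) (PySem.Set.ofList itemset))
           (PySem.Set.ofList itemset)
      then count + 1 else count)
    (fun (count : Int) y => if itemset.all (fun item => y.contains item) then count + 1 else count)
    0 (fun y _ acc => by simp only [pv_cond_eq])
  rw [hA, PySem.List.foldl_if_add_one, pv_count_eq]
  simp only [zero_add]
  split_ifs with h
  · simp only [Prod.mk.injEq]
    exact ⟨(decide_eq_true h).symm, trivial⟩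
  · simp only [Prod.mk.injEq]
    exact ⟨(decide_eq_false h).symm, trivial⟩
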